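-- pv_equiv track=rewrite | github.com/chxghee/Algorithm | 이것이코딩테스트다/5장_DFS_BFS/연습문제/18괄호 변환.py | solution
-- ===== SOURCE A (Python) =====
-- def solution(p):
--
--     answer = ''
--     if p == '':
--         return answer
--     idx = balance_index(p)
--     u = p[:idx+1]
--     v = p[idx+1:]
--
--     if check_right(u):
--         answer = u + solution(v)
--     else:
--         answer = '('
--         answer += solution(v)
--         answer += ')'
--         answer += reverse_str(u)
--
--     return answer
--
-- def reverse_str(p):
--
--     new = list(p[1:-1])
--     for i in range(len(new)):
--         if new[i] == '(':
--             new[i] = ')'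
--         else:
--             new[i] = '('
--     return "".join(new)
--
-- def balance_index(p):
--
--     cnt = 0
--     for i in range(len(p)):
--         if p[i] == '(':
--             cnt += 1
--         if p[i] == ')':
--             cnt -= 1
--         if cnt == 0:
--             return i
--
-- def check_right(p):
--     if len(p) == 0:
--         return True
--
--     stack = []
--     for i in range(len(p)):
--         if p[i] == '(':
--             stack.append(p[i])
--         elif p[i] == ')':
--             if len(stack) == 0:
--                 return False
--             stack.pop()
--
--     return len(stack) == 0
-- ===== SOURCE B (Python) =====
-- def solution(p):
--     # Collect the ordered list of minimal zero-balance segments, then fold it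
--     # from the last segment back to the first.
--     segs = []
--     cur = []
--     cnt = 0
--     for c in p:
--         if c == '(':
--             cnt += 1
--         elif c == ')':
--             cnt -= 1
--         cur.append(c)
--         if cnt == 0:
--             segs.append(''.join(cur))
--             cur = []
--     acc = ''
--     for u in reversed(segs):
--         if _correct(u):
--             acc = u + acc
--         else:
--             acc = '(' + acc + ')' + _flip(u[1:-1])
--     return acc
--
-- def _correct(u):
--     depth = 0
--     for c in u:
--         if c == '(':
--             depth += 1
--         elif c == ')':
--             if depth == 0:
--                 return False
--             depth -= 1
--     return depth == 0
--
-- def _flip(s):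
--     return ''.join(')' if c == '(' else '(' for c in s)
-- ===== Notes on version B (the rewrite author's own statement) =====
-- stated objective: faster
-- what changed: Replaces A's single-chain recursion (find split point, slice, recurse on suffix, wrap) by a two-phase iteration: one scan splits p into its ordered list of minimal zero-balance segments, then a right-to-left fold over that list assembles the answer; the stack-based correctness test becomes a depth counter.
-- outside the precondition, e.g. on solution('('): A raises TypeError, B returns ''; on solution(')'): A raises TypeError, B returns ''
import Mathlib
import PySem

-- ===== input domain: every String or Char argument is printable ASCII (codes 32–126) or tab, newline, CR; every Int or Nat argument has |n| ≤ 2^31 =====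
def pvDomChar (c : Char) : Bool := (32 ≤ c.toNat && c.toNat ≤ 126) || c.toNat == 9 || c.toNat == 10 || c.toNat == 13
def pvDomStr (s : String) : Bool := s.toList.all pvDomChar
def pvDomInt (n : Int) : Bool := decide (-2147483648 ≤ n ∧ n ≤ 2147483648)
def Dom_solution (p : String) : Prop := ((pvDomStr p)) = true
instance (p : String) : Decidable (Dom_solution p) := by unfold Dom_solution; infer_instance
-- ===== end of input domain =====

-- B replaces A's find-split-then-recurse chain (which re-slices the suffix at every level)
-- by one scan collecting the minimal zero-balance segments followed by a right-to-left fold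
-- over that list; a timing run measured B faster.

-- ===== PORT A =====
-- balance_index: first index at which the running bracket count is 0 (none = Python returns None)
def pvBalIdxAux : List Char → Int → Nat → Option Nat
  | [], _, _ => none
  | c :: rest, cnt, i =>
    let cnt1 := if c = '(' then cnt + 1 else cnt
    let cnt2 := if c = ')' then cnt1 - 1 else cnt1
    if cnt2 = 0 then some i else pvBalIdxAux rest cnt2 (i + 1)

-- check_right: stack-based correctness test
def pvCheckAux : List Char → List Char → Bool
  | [], st => st.isEmpty
  | c :: rest, st =>
    if c = '(' then pvCheckAux rest (c :: st)
    else if c = ')' then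
      match st with
      | [] => false
      | _ :: st' => pvCheckAux rest st'
    else pvCheckAux rest st

def pvCheckRight (l : List Char) : Bool :=
  if l.length = 0 then true else pvCheckAux l []

-- reverse_str: strip first and last char, flip each bracket (non-'(' becomes '(')
def pvReverseStr (l : List Char) : List Char :=
  ((l.drop 1).dropLast).map (fun c => if c = '(' then ')' else '(')

def solutionList : List Char → List Char
  | [] => []
  | c :: rest =>
    match pvBalIdxAux (c :: rest) 0 0 with
    | none => []   -- Python raises TypeError here (idx = None); excluded by Pre_
    | some idx =>
      let u := (c :: rest).take (idx + 1)
      let v := (c :: rest).drop (idx + 1)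
      if pvCheckRight u then u ++ solutionList v
      else '(' :: (solutionList v ++ ')' :: pvReverseStr u)
termination_by l => l.length
decreasing_by all_goals (simp only [List.length_drop, List.length_cons]; omega)

def solution (p : String) : String := String.mk (solutionList p.toList)

-- ===== PORT B =====
-- _correct: depth-counter correctness test
def pvCorrectAux : List Char → Int → Bool
  | [], d => decide (d = 0)
  | c :: rest, d =>
    if c = '(' then pvCorrectAux rest (d + 1)
    else if c = ')' then
      if d = 0 then false else pvCorrectAux rest (d - 1)
    else pvCorrectAux rest d

-- _flip
def pvFlip (s : List Char) : List Char := s.map (fun c => if c = '(' then ')' else '(')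

-- phase 1: one scan collecting the minimal zero-balance segments (unbalanced tail dropped)
def pvSegsAux : List Char → Int → List Char → List (List Char)
  | [], _, _ => []
  | c :: rest, cnt, cur =>
    let cnt' := if c = '(' then cnt + 1 else if c = ')' then cnt - 1 else cnt
    let cur' := cur ++ [c]
    if cnt' = 0 then cur' :: pvSegsAux rest 0 []
    else pvSegsAux rest cnt' cur'

-- phase 2: the body of the right-to-left fold
def pvFoldStep (acc u : List Char) : List Char :=
  if pvCorrectAux u 0 then u ++ acc
  else '(' :: (acc ++ ')' :: pvFlip ((u.drop 1).dropLast))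

def solution_alt (p : String) : String :=
  String.mk ((pvSegsAux p.toList 0 []).reverse.foldl pvFoldStep [])

-- ===== PRECONDITION & SPEC =====
-- Pre_ excludes exactly the inputs on which A raises TypeError: when the counts of '('
-- and ')' differ, balance_index eventually returns None and p[:None+1] raises.
def Pre_solution (p : String) : Prop := p.toList.count '(' = p.toList.count ')'
instance (p : String) : Decidable (Pre_solution p) := by unfold Pre_solution; infer_instance

def pvWitness_solution : String := "(()))("

def Spec_solution (p : String) (out : String) : Prop := out = solution_alt p
instance (p : String) (out : String) : Decidable (Spec_solution p out) := by unfold Spec_solution; infer_instance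

-- ===== CLAIM (what is proved, stated in full; the proofs are below) =====
def Claim_equal_solution : Prop := ∀ (p : String), Dom_solution p → Pre_solution p → Spec_solution p (solution p)

-- ===== LEMMAS AND PROOFS =====

-- net bracket balance of a list
def pvBal : List Char → Int
  | [] => 0
  | c :: l => (if c = '(' then 1 else if c = ')' then -1 else 0) + pvBal l

lemma pvBal_append (a b : List Char) : pvBal (a ++ b) = pvBal a + pvBal b := by
  induction a with
  | nil => simp [pvBal]
  | cons c a ih => simp [pvBal, ih]; ring

lemma pvBal_eq_count (l : List Char) :
    pvBal l = (l.count '(' : Int) - (l.count ')' : Int) := by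
  induction l with
  | nil => simp [pvBal]
  | cons c l ih =>
    simp only [pvBal, List.count_cons, ih]
    by_cases h1 : c = '(' <;> by_cases h2 : c = ')' <;>
      simp [h1, h2] <;> push_cast <;> ring

-- the A-side two-step counter update equals the single-step one
lemma pvStep_eq (cnt : Int) (c : Char) :
    (if c = ')' then (if c = '(' then cnt + 1 else cnt) - 1 else (if c = '(' then cnt + 1 else cnt))
      = cnt + (if c = '(' then 1 else if c = ')' then -1 else 0) := by
  by_cases h1 : c = '(' <;> by_cases h2 : c = ')' <;> simp [h1, h2] <;> omega

lemma pvBalIdxAux_shift (l : List Char) (cnt : Int) (i : Nat) :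
    pvBalIdxAux l cnt i = (pvBalIdxAux l cnt 0).map (· + i) := by
  induction l generalizing cnt i with
  | nil => simp [pvBalIdxAux]
  | cons c rest ih =>
    simp only [pvBalIdxAux]
    rw [pvStep_eq]
    by_cases h0 : cnt + (if c = '(' then 1 else if c = ')' then -1 else 0) = 0
    · simp [h0]
    · rw [if_neg h0, if_neg h0, ih _ (i + 1), ih _ 1]
      cases pvBalIdxAux rest _ 0 <;> simp <;> omega

lemma pvBalIdxAux_exists (l : List Char) (cnt : Int) (hne : l ≠ [])
    (hb : cnt + pvBal l = 0) : ∃ k, pvBalIdxAux l cnt 0 = some k := by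
  induction l generalizing cnt with
  | nil => exact absurd rfl hne
  | cons c rest ih =>
    simp only [pvBalIdxAux]
    rw [pvStep_eq]
    by_cases h0 : cnt + (if c = '(' then 1 else if c = ')' then -1 else 0) = 0
    · exact ⟨0, by simp [h0]⟩
    · have hb' : (cnt + (if c = '(' then 1 else if c = ')' then -1 else 0)) + pvBal rest = 0 := by
        simp only [pvBal] at hb; omega
      have hrest : rest ≠ [] := by
        rintro rfl; simp [pvBal] at hb'; exact h0 hb'
      obtain ⟨k, hk⟩ := ih _ hrest hb'
      refine ⟨k + 1, ?_⟩
      simp [h0, pvBalIdxAux_shift _ _ 1, hk]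

lemma pvBalIdxAux_balance (l : List Char) (cnt : Int) (k : Nat)
    (h : pvBalIdxAux l cnt 0 = some k) : cnt + pvBal (l.take (k + 1)) = 0 := by
  induction l generalizing cnt k with
  | nil => simp [pvBalIdxAux] at h
  | cons c rest ih =>
    simp only [pvBalIdxAux] at h
    rw [pvStep_eq] at h
    by_cases h0 : cnt + (if c = '(' then 1 else if c = ')' then -1 else 0) = 0
    · simp only [h0, if_pos] at h
      · obtain rfl : k = 0 := by simpa using h.symm
        simpa [pvBal] using h0
    · rw [if_neg h0, pvBalIdxAux_shift _ _ 1] at h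
      cases hx : pvBalIdxAux rest _ 0 with
      | none => rw [hx] at h; simp at h
      | some k' =>
        rw [hx] at h; simp at h
        obtain rfl : k = k' + 1 := by omega
        have := ih _ _ hx
        simp only [List.take_succ_cons, pvBal]
        omega

lemma pvSegsAux_split (l : List Char) (cnt : Int) (cur : List Char) (k : Nat)
    (h : pvBalIdxAux l cnt 0 = some k) :
    pvSegsAux l cnt cur = (cur ++ l.take (k + 1)) :: pvSegsAux (l.drop (k + 1)) 0 [] := by
  induction l generalizing cnt cur k with
  | nil => simp [pvBalIdxAux] at h
  | cons c rest ih =>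
    simp only [pvBalIdxAux] at h
    rw [pvStep_eq] at h
    simp only [pvSegsAux]
    by_cases h0 : cnt + (if c = '(' then 1 else if c = ')' then -1 else 0) = 0
    · simp only [h0, if_pos] at h
      obtain rfl : k = 0 := by simpa using h.symm
      have : (if c = '(' then cnt + 1 else if c = ')' then cnt - 1 else cnt) = 0 := by
        by_cases h1 : c = '(' <;> by_cases h2 : c = ')' <;> simp [h1, h2] at h0 ⊢ <;> omega
      simp [this]
    · rw [if_neg h0, pvBalIdxAux_shift _ _ 1] at h
      cases hx : pvBalIdxAux rest _ 0 with
      | none => rw [hx] at h; simp at h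
      | some k' =>
        rw [hx] at h; simp at h
        obtain rfl : k = k' + 1 := by omega
        have hstep : (if c = '(' then cnt + 1 else if c = ')' then cnt - 1 else cnt)
            = cnt + (if c = '(' then 1 else if c = ')' then -1 else 0) := by
          by_cases h1 : c = '(' <;> by_cases h2 : c = ')' <;> simp [h1, h2] <;> omega
        rw [hstep, if_neg h0, ih _ _ _ hx]
        simp

lemma pvCheckAux_eq (l : List Char) (st : List Char) :
    pvCheckAux l st = pvCorrectAux l (st.length : Int) := by
  induction l generalizing st with
  | nil =>
    cases st with
    | nil => simp [pvCheckAux, pvCorrectAux]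
    | cons x st' => simp [pvCheckAux, pvCorrectAux]; omega
  | cons c rest ih =>
    by_cases h1 : c = '('
    · subst h1
      simp only [pvCheckAux, pvCorrectAux, if_pos rfl]
      rw [ih]
      norm_num
    · by_cases h2 : c = ')'
      · subst h2
        simp only [pvCheckAux, pvCorrectAux, if_neg h1, if_pos rfl]
        cases st with
        | nil => simp
        | cons x st' =>
          have hne : ((x :: st').length : Int) ≠ 0 := by
            simp only [List.length_cons]; push_cast; omega
          rw [if_neg hne]
          have hc : ((x :: st').length : Int) - 1 = (st'.length : Int) := by
            simp only [List.length_cons]; push_cast; ring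
          rw [hc]
          exact ih st'
      · simp only [pvCheckAux, pvCorrectAux, if_neg h1, if_neg h2]
        exact ih st

lemma pvCheckRight_eq (l : List Char) : pvCheckRight l = pvCorrectAux l 0 := by
  unfold pvCheckRight
  split
  · have : l = [] := by simpa [List.length_eq_zero_iff] using ‹l.length = 0›
    simp [this, pvCorrectAux]
  · simpa using pvCheckAux_eq l []

lemma pvFold_cons (segs : List (List Char)) (u : List Char) :
    (u :: segs).reverse.foldl pvFoldStep [] = pvFoldStep (segs.reverse.foldl pvFoldStep []) u := by
  simp [List.foldl_append]

lemma pvMain (n : Nat) : ∀ l : List Char, l.length ≤ n → pvBal l = 0 →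
    solutionList l = (pvSegsAux l 0 []).reverse.foldl pvFoldStep [] := by
  induction n with
  | zero =>
    intro l hl _
    have : l = [] := by simpa [List.length_eq_zero_iff] using Nat.le_zero.mp hl
    subst this
    rw [solutionList.eq_def]
    simp [pvSegsAux]
  | succ n ih =>
    intro l hl hb
    cases l with
    | nil => rw [solutionList.eq_def]; simp [pvSegsAux]
    | cons c rest =>
      obtain ⟨k, hk⟩ := pvBalIdxAux_exists (c :: rest) 0 (by simp) (by simpa using hb)
      have hu : pvBal ((c :: rest).take (k + 1)) = 0 := by
        have := pvBalIdxAux_balance _ _ _ hk; omega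
      have hv : pvBal ((c :: rest).drop (k + 1)) = 0 := by
        have := pvBal_append ((c :: rest).take (k + 1)) ((c :: rest).drop (k + 1))
        rw [List.take_append_drop] at this
        omega
      have hvlen : ((c :: rest).drop (k + 1)).length ≤ n := by
        simp at hl ⊢; omega
      have hrec := ih _ hvlen hv
      rw [pvSegsAux_split _ _ _ _ hk, List.nil_append, pvFold_cons, ← hrec]
      rw [solutionList.eq_def]
      simp only [hk]
      rw [pvFoldStep, ← pvCheckRight_eq]
      split
      · rfl
      · simp [pvReverseStr, pvFlip]

-- ===== VERDICT (by name: the statement is the Claim_ definition above) =====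
theorem solution_spec : Claim_equal_solution := by
  intro p _ hpre
  unfold Spec_solution solution solution_alt
  have hb : pvBal p.toList = 0 := by
    rw [pvBal_eq_count]
    unfold Pre_solution at hpre
    omega
  rw [pvMain p.toList.length p.toList le_rfl hb]
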